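-- pv_equiv track=rewrite | github.com/lwh9346/NoGoZero | nogo.py | _bfs_group
-- ===== SOURCE A (Python) =====
-- _cxy = [(-1, 0), (0, -1), (1, 0), (0, 1)]
--
-- def _bfs_group(board_A, board_B, x0, y0):
--     airs = set()
--     visited = set()
--     to_visit = [(x0, y0)]
--     i = 0
--     while i < len(to_visit):
--         x, y = to_visit[i]
--         i += 1
--         if (x, y) in visited:
--             continue
--         visited.add((x, y))
--         for dx, dy in _cxy:
--             fx, fy = x+dx, y+dy
--             if not _in_board(fx, fy):
--                 continue
--             if board_A[fx][fy] and not (fx, fy) in visited: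
--                 to_visit.append((fx, fy))
--     for x, y in visited:
--         for dx, dy in _cxy:
--             fx, fy = x+dx, y+dy
--             if not _in_board(fx, fy):
--                 continue
--             if board_A[fx][fy] == 0 and board_B[fx][fy] == 0:
--                 airs.add((fx, fy))
--     return visited, airs
--
-- def _in_board(x, y):
--     return x >= 0 and x < 9 and y >= 0 and y < 9
-- ===== SOURCE B (Python) =====
-- _cxy = [(-1, 0), (0, -1), (1, 0), (0, 1)]
--
-- def _bfs_group(board_A, board_B, x0, y0):
--     group = [(x0, y0)]
--     airs = set()
--     seen = {(x0, y0)}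
--     frontier = [(x0, y0)]
--     while frontier:
--         nxt = []
--         for x, y in frontier:
--             for dx, dy in _cxy:
--                 fx, fy = x + dx, y + dy
--                 if 0 <= fx < 9 and 0 <= fy < 9:
--                     if board_A[fx][fy]:
--                         if (fx, fy) not in seen:
--                             seen.add((fx, fy))
--                             nxt.append((fx, fy))
--                     elif board_B[fx][fy] == 0:
--                         airs.add((fx, fy))
--         group.extend(nxt)
--         frontier = nxt
--     return set(group), airs
-- ===== Notes on version B (the rewrite author's own statement) =====
-- stated objective: alternative
-- what changed: B replaces A's index-cursor queue with dedup-at-dequeue plus a separate second liberty sweep over the finished group by a level-synchronous BFS: it expands whole frontiers at once (dedup at enqueue, so the dequeue-time visited check disappears), collects liberties inline during the expansion, and the second pass over the group is gone.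
import Mathlib
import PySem

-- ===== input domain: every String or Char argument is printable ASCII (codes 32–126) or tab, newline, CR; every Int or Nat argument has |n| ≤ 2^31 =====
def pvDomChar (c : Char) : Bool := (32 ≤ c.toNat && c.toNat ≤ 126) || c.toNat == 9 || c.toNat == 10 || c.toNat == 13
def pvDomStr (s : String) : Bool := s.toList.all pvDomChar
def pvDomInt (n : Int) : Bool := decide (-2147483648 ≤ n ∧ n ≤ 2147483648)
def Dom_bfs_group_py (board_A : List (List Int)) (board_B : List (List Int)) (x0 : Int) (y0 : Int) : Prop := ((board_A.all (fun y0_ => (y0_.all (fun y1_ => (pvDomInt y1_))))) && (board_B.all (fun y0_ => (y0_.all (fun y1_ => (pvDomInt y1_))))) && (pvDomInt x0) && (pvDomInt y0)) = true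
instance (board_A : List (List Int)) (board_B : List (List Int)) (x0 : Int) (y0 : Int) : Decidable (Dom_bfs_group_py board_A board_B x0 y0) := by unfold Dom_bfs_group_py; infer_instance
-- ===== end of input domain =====

-- ===== PORT A =====
-- B replaces A's index-cursor queue (dedup at dequeue) + second liberty sweep by a
-- level-synchronous BFS that expands whole frontiers and collects liberties inline.
-- Board cells are read with pyGetD (default 0): exact wherever Python indexes in range,
-- which Pre_ guarantees for every cell the algorithm actually reads.

-- _cxy
def pvCxy : List (Int × Int) := [(-1, 0), (0, -1), (1, 0), (0, 1)]

-- _in_board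
def pvInBoard (x y : Int) : Bool := decide (x ≥ 0) && decide (x < 9) && decide (y ≥ 0) && decide (y < 9)

-- board[x][y] (total form of Python's indexing; exact when in range — ensured by Pre_)
def pvCell (b : List (List Int)) (x y : Int) : Int :=
  PySem.List.pyGetD (PySem.List.pyGetD b x []) y 0

-- the inner 'for dx, dy in _cxy' of A's first loop, generalized over the offset list
def pvScanAGo (bA : List (List Int)) (visited' : PySem.Set (Int × Int)) (x y : Int)
    (offs : List (Int × Int)) (acc : List (Int × Int)) : List (Int × Int) :=
  match offs with
  | [] => acc
  | d :: t =>
    let fx := x + d.1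
    let fy := y + d.2
    pvScanAGo bA visited' x y t
      (if !(pvInBoard fx fy) then acc
       else if pvCell bA fx fy != 0 && !(PySem.Set.contains visited' (fx, fy)) then
         acc ++ [(fx, fy)]
       else acc)

def pvScanA (bA : List (List Int)) (visited' : PySem.Set (Int × Int)) (x y : Int) :
    List (Int × Int) :=
  pvScanAGo bA visited' x y pvCxy []

-- A's while-loop: to_visit[i:] is 'pending'; dedup happens at dequeue time.
-- 'fuel' is only a totality guard: pvLoopAF_eq below proves 400 steps always suffice
-- on the 9x9 board, so the port computes exactly what Python's unbounded loop computes.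
def pvLoopAF (bA : List (List Int)) (fuel : Nat)
    (pending : List (Int × Int)) (visited : PySem.Set (Int × Int)) : PySem.Set (Int × Int) :=
  match fuel with
  | 0 => visited
  | fuel' + 1 =>
    match pending with
    | [] => visited
    | (x, y) :: rest =>
      if PySem.Set.contains visited (x, y) then pvLoopAF bA fuel' rest visited
      else
        pvLoopAF bA fuel' (rest ++ pvScanA bA (PySem.Set.add visited (x, y)) x y)
          (PySem.Set.add visited (x, y))

-- A's second loop, per group cell: add empty neighbours to airs
def pvAirsGo (bA bB : List (List Int)) (x y : Int) (offs : List (Int × Int))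
    (a : PySem.Set (Int × Int)) : PySem.Set (Int × Int) :=
  match offs with
  | [] => a
  | d :: t =>
    let fx := x + d.1
    let fy := y + d.2
    pvAirsGo bA bB x y t
      (if !(pvInBoard fx fy) then a
       else if pvCell bA fx fy == 0 && pvCell bB fx fy == 0 then PySem.Set.add a (fx, fy)
       else a)

def pvAirsCell (bA bB : List (List Int)) (a : PySem.Set (Int × Int)) (c : Int × Int) :
    PySem.Set (Int × Int) :=
  pvAirsGo bA bB c.1 c.2 pvCxy a

def bfs_group_py (board_A : List (List Int)) (board_B : List (List Int)) (x0 : Int) (y0 : Int) :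
    (List (Int × Int)) × (List (Int × Int)) :=
  let visited := pvLoopAF board_A 400 [(x0, y0)] PySem.Set.empty
  -- iteration over the Python set 'visited' is taken in insertion order; airs is a set,
  -- so the returned value does not depend on that choice
  (visited, visited.foldl (pvAirsCell board_A board_B) PySem.Set.empty)

-- ===== PORT B =====
-- B's loop state: (nxt so far, seen, airs)
abbrev pvSt := List (Int × Int) × PySem.Set (Int × Int) × PySem.Set (Int × Int)

-- one neighbour (fx, fy) = (x+dx, y+dy) of the frontier cell (x, y)
def altVisit (bA bB : List (List Int)) (x y : Int) (st : pvSt) (d : Int × Int) : pvSt :=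
  if decide (0 ≤ x + d.1) && decide (x + d.1 < 9) && decide (0 ≤ y + d.2) && decide (y + d.2 < 9) then
    if PySem.List.pyGetD (PySem.List.pyGetD bA (x + d.1) []) (y + d.2) 0 != 0 then
      if PySem.Set.contains st.2.1 (x + d.1, y + d.2) then st
      else (st.1 ++ [(x + d.1, y + d.2)], PySem.Set.add st.2.1 (x + d.1, y + d.2), st.2.2)
    else if PySem.List.pyGetD (PySem.List.pyGetD bB (x + d.1) []) (y + d.2) 0 == 0 then
      (st.1, st.2.1, PySem.Set.add st.2.2 (x + d.1, y + d.2))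
    else st
  else st

-- the whole 'for dx, dy in _cxy' scan of one frontier cell
def altStep (bA bB : List (List Int)) (st : pvSt) (c : Int × Int) : pvSt :=
  pvCxy.foldl (altVisit bA bB c.1 c.2) st

-- 'while frontier:' — expand the whole frontier, extend group, recurse on the new frontier.
-- 'fuel' is only a totality guard: altLoopF_eq below proves 100 levels always suffice.
def altLoopF (bA bB : List (List Int)) (fuel : Nat)
    (frontier group : List (Int × Int)) (seen airs : PySem.Set (Int × Int)) :
    (List (Int × Int)) × (List (Int × Int)) :=
  match fuel with
  | 0 => (PySem.Set.ofList group, airs)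
  | fuel' + 1 =>
    match frontier with
    | [] => (PySem.Set.ofList group, airs)
    | c :: fr =>
      let st := (c :: fr).foldl (altStep bA bB) ([], seen, airs)
      altLoopF bA bB fuel' st.1 (group ++ st.1) st.2.1 st.2.2

def bfs_group_py_alt (board_A : List (List Int)) (board_B : List (List Int)) (x0 : Int) (y0 : Int) :
    (List (Int × Int)) × (List (Int × Int)) :=
  altLoopF board_A board_B 100 [(x0, y0)] [(x0, y0)]
    (PySem.Set.add PySem.Set.empty (x0, y0)) PySem.Set.empty

-- ===== PRECONDITION & SPEC =====
-- Pre_ excludes boards smaller than 9x9 whose edge the start touches: there Python indexes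
-- board_A[fx][fy]/board_B[fx][fy] out of range and usually raises IndexError (on a few such
-- ragged boards A happens to return; those are also excluded — see the cites).
def pvRowsOk (b : List (List Int)) : Bool :=
  decide (9 ≤ b.length) && (b.take 9).all (fun r => decide (9 ≤ r.length))

def pvIsolated (x0 y0 : Int) : Bool :=
  !pvInBoard (x0 - 1) y0 && !pvInBoard (x0 + 1) y0 && !pvInBoard x0 (y0 - 1) && !pvInBoard x0 (y0 + 1)

def Pre_bfs_group_py (board_A : List (List Int)) (board_B : List (List Int)) (x0 : Int) (y0 : Int) : Prop :=
  (pvRowsOk board_A && pvRowsOk board_B || pvIsolated x0 y0) = true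

instance (board_A : List (List Int)) (board_B : List (List Int)) (x0 : Int) (y0 : Int) :
    Decidable (Pre_bfs_group_py board_A board_B x0 y0) := by
  unfold Pre_bfs_group_py; infer_instance

def pvWitness_bfs_group_py : List (List Int) × List (List Int) × Int × Int :=
  (List.replicate 9 (List.replicate 9 0), List.replicate 9 (List.replicate 9 0), 0, 0)

def Spec_bfs_group_py (board_A : List (List Int)) (board_B : List (List Int)) (x0 : Int) (y0 : Int) (out : (List (Int × Int)) × (List (Int × Int))) : Prop := out = bfs_group_py_alt board_A board_B x0 y0
instance (board_A : List (List Int)) (board_B : List (List Int)) (x0 : Int) (y0 : Int) (out : (List (Int × Int)) × (List (Int × Int))) : Decidable (Spec_bfs_group_py board_A board_B x0 y0 out) := by unfold Spec_bfs_group_py; infer_instance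

-- ===== CLAIM (what is proved, stated in full; the proofs are below) =====
def Claim_equal_bfs_group_py : Prop := ∀ (board_A : List (List Int)) (board_B : List (List Int)) (x0 : Int) (y0 : Int), Dom_bfs_group_py board_A board_B x0 y0 → Pre_bfs_group_py board_A board_B x0 y0 → Spec_bfs_group_py board_A board_B x0 y0 (bfs_group_py board_A board_B x0 y0)

-- ===== LEMMAS AND PROOFS =====
-- termination infrastructure for the BFS loops (cited by name in decreasing_by)
def pvBoardCells : List (Int × Int) :=
  (List.range 9).flatMap (fun i => (List.range 9).map (fun j => ((i : Int), (j : Int))))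

def pvAllCells (x0 y0 : Int) : List (Int × Int) := (x0, y0) :: pvBoardCells

def pvUnseen (x0 y0 : Int) (s : PySem.Set (Int × Int)) : Nat :=
  ((pvAllCells x0 y0).filter (fun c => !(PySem.Set.contains s c))).length

lemma pv_contains_eq (s : List (Int × Int)) (z : Int × Int) :
    PySem.Set.contains s z = decide (z ∈ s) := by
  simp [PySem.Set.contains]

lemma pv_add_contains (s : PySem.Set (Int × Int)) (c z : Int × Int) :
    PySem.Set.contains (PySem.Set.add s c) z = (PySem.Set.contains s z || decide (z = c)) := by
  by_cases h : PySem.Set.contains s c = true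
  · have hc : c ∈ s := by simpa [pv_contains_eq] using h
    by_cases hz : z = c
    · subst hz
      simp [PySem.Set.add, h, pv_contains_eq, hc]
    · simp [PySem.Set.add, h, hz, hc]
  · have hc : c ∉ s := by simpa [pv_contains_eq] using h
    by_cases hz : z = c <;>
      simp [PySem.Set.add, h, pv_contains_eq, List.mem_append, hz, hc]

lemma pvFilter_le {α : Type} (l : List α) (p q : α → Bool)
    (mono : ∀ z, q z = true → p z = true) :
    (l.filter q).length ≤ (l.filter p).length := by
  induction l with
  | nil => simp
  | cons a t ih =>
    rw [List.filter_cons, List.filter_cons]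
    by_cases hq : q a = true
    · rw [if_pos hq, if_pos (mono a hq)]
      simpa using ih
    · rw [if_neg hq]
      split
      · exact le_trans ih (Nat.le_succ _)
      · exact ih

lemma pvFilter_lt {α : Type} (l : List α) (p q : α → Bool)
    (mono : ∀ z, q z = true → p z = true) (c : α) (hc : c ∈ l)
    (hp : p c = true) (hq : q c = false) :
    (l.filter q).length < (l.filter p).length := by
  induction l with
  | nil => simp at hc
  | cons a t ih =>
    rw [List.filter_cons, List.filter_cons]
    rcases List.mem_cons.1 hc with rfl | hmem
    · rw [if_neg (by simp [hq]), if_pos hp]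
      exact Nat.lt_succ_of_le (pvFilter_le t p q mono)
    · have ihh := ih hmem
      by_cases hqa : q a = true
      · rw [if_pos hqa, if_pos (mono a hqa)]
        simpa using ihh
      · rw [if_neg hqa]
        split
        · exact lt_trans ihh (Nat.lt_succ_self _)
        · exact ihh

lemma pvInBoard_mem {x y : Int} (h : pvInBoard x y = true) : (x, y) ∈ pvBoardCells := by
  have hb : 0 ≤ x ∧ x < 9 ∧ 0 ≤ y ∧ y < 9 := by
    simp only [pvInBoard, ge_iff_le, Bool.and_eq_true, decide_eq_true_eq] at h
    omega
  have hx : x = 0 ∨ x = 1 ∨ x = 2 ∨ x = 3 ∨ x = 4 ∨ x = 5 ∨ x = 6 ∨ x = 7 ∨ x = 8 := by omega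
  have hy : y = 0 ∨ y = 1 ∨ y = 2 ∨ y = 3 ∨ y = 4 ∨ y = 5 ∨ y = 6 ∨ y = 7 ∨ y = 8 := by omega
  rcases hx with rfl | rfl | rfl | rfl | rfl | rfl | rfl | rfl | rfl <;>
    rcases hy with rfl | rfl | rfl | rfl | rfl | rfl | rfl | rfl | rfl <;> decide

lemma pvContains_add_mono {s : PySem.Set (Int × Int)} {c z : Int × Int}
    (hz : PySem.Set.contains (PySem.Set.add s c) z = false) :
    PySem.Set.contains s z = false := by
  rw [pv_add_contains] at hz
  simp only [Bool.or_eq_false_iff] at hz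
  exact hz.1

lemma pvUnseen_add_lt {x0 y0 : Int} {s : PySem.Set (Int × Int)} {c : Int × Int}
    (hc : c ∈ pvAllCells x0 y0) (hs : PySem.Set.contains s c = false) :
    pvUnseen x0 y0 (PySem.Set.add s c) < pvUnseen x0 y0 s := by
  refine pvFilter_lt _ _ _ ?_ c hc ?_ ?_
  · intro z hz
    rw [Bool.not_eq_true'] at hz ⊢
    exact pvContains_add_mono hz
  · simp only [Bool.not_eq_true', Bool.not_eq_false']
    exact hs
  · rw [Bool.not_eq_false', pv_add_contains]
    simp

-- progress relation used by the termination arguments of B's level loop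
def pvProg (x0 y0 : Int) (s r : pvSt) : Prop :=
  (r.1 = s.1 ∧ r.2.1 = s.2.1) ∨
    (s.1 <+: r.1 ∧ s.1.length < r.1.length ∧ pvUnseen x0 y0 r.2.1 < pvUnseen x0 y0 s.2.1)

lemma pvProg_trans {x0 y0 : Int} {s m r : pvSt}
    (h1 : pvProg x0 y0 s m) (h2 : pvProg x0 y0 m r) : pvProg x0 y0 s r := by
  rcases h1 with ⟨e1, e2⟩ | ⟨p1, l1, u1⟩
  · rcases h2 with ⟨f1, f2⟩ | ⟨q1, m1, v1⟩
    · exact Or.inl ⟨f1.trans e1, f2.trans e2⟩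
    · exact Or.inr ⟨e1 ▸ q1, e1 ▸ m1, e2 ▸ v1⟩
  · rcases h2 with ⟨f1, f2⟩ | ⟨q1, m1, v1⟩
    · exact Or.inr ⟨f1 ▸ p1, f1 ▸ l1, f2 ▸ u1⟩
    · exact Or.inr ⟨p1.trans q1, lt_trans l1 m1, lt_trans v1 u1⟩

lemma pvProg_foldl {α : Type} (x0 y0 : Int) (f : pvSt → α → pvSt)
    (hf : ∀ s a, pvProg x0 y0 s (f s a)) :
    ∀ (l : List α) (s : pvSt), pvProg x0 y0 s (l.foldl f s) := by
  intro l
  induction l with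
  | nil => intro s; exact Or.inl ⟨rfl, rfl⟩
  | cons a t ih => intro s; exact pvProg_trans (hf s a) (ih (f s a))

lemma altVisit_prog (bA bB : List (List Int)) (x0 y0 x y : Int) (st : pvSt) (d : Int × Int) :
    pvProg x0 y0 st (altVisit bA bB x y st d) := by
  unfold altVisit
  split_ifs with h1 h2 h3 h4
  · exact Or.inl ⟨rfl, rfl⟩
  · refine Or.inr ⟨⟨[(x + d.1, y + d.2)], rfl⟩, by simp, ?_⟩
    refine pvUnseen_add_lt ?_ (by simpa using h3)
    refine List.mem_cons_of_mem _ (pvInBoard_mem (x := x + d.1) (y := y + d.2) ?_)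
    simpa [pvInBoard, ge_iff_le] using h1
  · exact Or.inl ⟨rfl, rfl⟩
  · exact Or.inl ⟨rfl, rfl⟩
  · exact Or.inl ⟨rfl, rfl⟩

lemma altStep_prog (bA bB : List (List Int)) (x0 y0 : Int) (st : pvSt) (c : Int × Int) :
    pvProg x0 y0 st (altStep bA bB st c) :=
  pvProg_foldl x0 y0 _ (altVisit_prog bA bB x0 y0 c.1 c.2) pvCxy st


lemma pvScanAGo_mem {bA : List (List Int)} {visited' : PySem.Set (Int × Int)} {x y : Int}
    {offs acc : List (Int × Int)} {c : Int × Int}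
    (hc : c ∈ pvScanAGo bA visited' x y offs acc) : c ∈ acc ∨ pvInBoard c.1 c.2 = true := by
  induction offs generalizing acc with
  | nil => exact Or.inl (by simpa [pvScanAGo] using hc)
  | cons d t ih =>
    simp only [pvScanAGo] at hc
    rcases ih hc with h1 | h1
    · split_ifs at h1 with h2 h3
      · exact Or.inl h1
      · rcases List.mem_append.1 h1 with h4 | h4
        · exact Or.inl h4
        · right
          simp only [List.mem_singleton] at h4
          subst h4
          simpa using h2
      · exact Or.inl h1
    · exact Or.inr h1

-- ideal (unfuelled) form of A's loop, proof-side only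
def pvLoopA (bA : List (List Int)) (x0 y0 : Int)
    (pending : List (Int × Int)) (visited : PySem.Set (Int × Int))
    (h : ∀ p ∈ pending, p ∈ pvAllCells x0 y0) : PySem.Set (Int × Int) :=
  match pending with
  | [] => visited
  | (x, y) :: rest =>
    if hv : PySem.Set.contains visited (x, y) = true then
      pvLoopA bA x0 y0 rest visited (fun p hp => h p (List.mem_cons_of_mem _ hp))
    else
      pvLoopA bA x0 y0 (rest ++ pvScanA bA (PySem.Set.add visited (x, y)) x y)
        (PySem.Set.add visited (x, y))
        (by
          intro p hp
          rcases List.mem_append.1 hp with h1 | h2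
          · exact h p (List.mem_cons_of_mem _ h1)
          · rcases pvScanAGo_mem h2 with h3 | h3
            · simp at h3
            · exact List.mem_cons_of_mem _ (pvInBoard_mem h3))
termination_by (pvUnseen x0 y0 visited, pending.length)
decreasing_by
  · exact Prod.Lex.right _ (Nat.lt_succ_self _)
  · exact Prod.Lex.left _ _
      (pvUnseen_add_lt (h (x, y) List.mem_cons_self) (by simpa using hv))

-- ideal (unfuelled) form of B's level loop, proof-side only
def altLoop (bA bB : List (List Int)) (x0 y0 : Int)
    (frontier group : List (Int × Int)) (seen airs : PySem.Set (Int × Int)) :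
    (List (Int × Int)) × (List (Int × Int)) :=
  match frontier with
  | [] => (PySem.Set.ofList group, airs)
  | c :: fr =>
    let st := (c :: fr).foldl (altStep bA bB) ([], seen, airs)
    altLoop bA bB x0 y0 st.1 (group ++ st.1) st.2.1 st.2.2
termination_by (pvUnseen x0 y0 seen, frontier.length)
decreasing_by
  rcases pvProg_foldl x0 y0 (altStep bA bB) (altStep_prog bA bB x0 y0) (c :: fr)
      ([], seen, airs) with ⟨h1, h2⟩ | ⟨-, -, h⟩
  · rw [h1, h2]
    exact Prod.Lex.right _ (by simp)
  · exact Prod.Lex.left _ _ h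

-- fuel sufficiency for A's loop: the scan appends at most one cell per offset …
lemma pvScanAGo_len (bA : List (List Int)) (vis : PySem.Set (Int × Int)) (x y : Int) :
    ∀ (offs acc : List (Int × Int)),
      (pvScanAGo bA vis x y offs acc).length ≤ acc.length + offs.length := by
  intro offs
  induction offs with
  | nil => intro acc; simp [pvScanAGo]
  | cons d t ih =>
    intro acc
    simp only [pvScanAGo]
    refine le_trans (ih _) ?_
    split_ifs <;> simp <;> omega

-- … so the queue grows by at most 4 per visit while pvUnseen drops, and
-- pending.length + 4 * pvUnseen bounds the number of loop iterations
lemma pvLoopAF_eq (bA : List (List Int)) (x0 y0 : Int) :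
    ∀ (fuel : Nat) (pending : List (Int × Int)) (visited : PySem.Set (Int × Int))
      (h : ∀ p ∈ pending, p ∈ pvAllCells x0 y0),
      pending.length + 4 * pvUnseen x0 y0 visited ≤ fuel →
      pvLoopAF bA fuel pending visited = pvLoopA bA x0 y0 pending visited h := by
  intro fuel
  induction fuel with
  | zero =>
    intro pending visited h hb
    have hp : pending = [] := by
      cases pending with
      | nil => rfl
      | cons a t => simp at hb
    subst hp
    simp [pvLoopAF, pvLoopA]
  | succ fuel' ih =>
    intro pending visited h hb
    match pending with
    | [] => simp [pvLoopAF, pvLoopA]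
    | (x, y) :: rest =>
      simp only [pvLoopAF, pvLoopA]
      by_cases hv : PySem.Set.contains visited (x, y) = true
      · rw [if_pos hv, dif_pos hv]
        refine ih rest visited _ ?_
        simp only [List.length_cons] at hb
        omega
      · rw [if_neg hv, dif_neg hv]
        have hu : pvUnseen x0 y0 (PySem.Set.add visited (x, y)) < pvUnseen x0 y0 visited :=
          pvUnseen_add_lt (h (x, y) List.mem_cons_self) (by simpa using hv)
        have hs : (pvScanA bA (PySem.Set.add visited (x, y)) x y).length ≤ 4 := by
          have := pvScanAGo_len bA (PySem.Set.add visited (x, y)) x y pvCxy []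
          simpa [pvScanA, pvCxy] using this
        refine ih _ _ _ ?_
        rw [List.length_append]
        simp only [List.length_cons] at hb
        omega

-- fuel sufficiency for B's loop: every level before the last one discovers a stone
lemma altLoopF_frontier_nil (bA bB : List (List Int)) (fuel : Nat)
    (group : List (Int × Int)) (seen airs : PySem.Set (Int × Int)) :
    altLoopF bA bB fuel [] group seen airs = (PySem.Set.ofList group, airs) := by
  cases fuel <;> simp [altLoopF]

lemma altLoopF_eq (bA bB : List (List Int)) (x0 y0 : Int) :
    ∀ (fuel : Nat) (frontier group : List (Int × Int)) (seen airs : PySem.Set (Int × Int)),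
      2 + pvUnseen x0 y0 seen ≤ fuel →
      altLoopF bA bB fuel frontier group seen airs =
        altLoop bA bB x0 y0 frontier group seen airs := by
  intro fuel
  induction fuel with
  | zero => intro frontier group seen airs hb; omega
  | succ fuel' ih =>
    intro frontier group seen airs hb
    match frontier with
    | [] => simp [altLoopF, altLoop]
    | c :: fr =>
      simp only [altLoopF, altLoop]
      rcases pvProg_foldl x0 y0 (altStep bA bB) (altStep_prog bA bB x0 y0) (c :: fr)
          ([], seen, airs) with ⟨e1, e2⟩ | ⟨-, -, hlt⟩
      · rw [e1, e2, altLoopF_frontier_nil]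
        simp [altLoop]
      · refine ih _ _ _ _ ?_
        have hlt' : pvUnseen x0 y0 ((c :: fr).foldl (altStep bA bB) ([], seen, airs)).2.1 <
            pvUnseen x0 y0 seen := hlt
        omega

-- raw cell reads of B's port, folded back to A's helper
lemma pvCellA_eq (b : List (List Int)) (x y : Int) :
    PySem.List.pyGetD (PySem.List.pyGetD b x []) y 0 = pvCell b x y := rfl

-- intermediate loop C (proof-only): B's per-cell scan driven by A's single queue
def loopC (bA bB : List (List Int)) (x0 y0 : Int)
    (pending : List (Int × Int)) (visited seen airs : PySem.Set (Int × Int)) :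
    PySem.Set (Int × Int) × PySem.Set (Int × Int) :=
  match pending with
  | [] => (visited, airs)
  | (x, y) :: rest =>
    let st := altStep bA bB ([], seen, airs) (x, y)
    loopC bA bB x0 y0 (rest ++ st.1) (PySem.Set.add visited (x, y)) st.2.1 st.2.2
termination_by (pvUnseen x0 y0 seen, pending.length)
decreasing_by
  rcases altStep_prog bA bB x0 y0 ([], seen, airs) (x, y) with ⟨h1, h2⟩ | ⟨-, -, h⟩
  · rw [h1, h2]
    exact Prod.Lex.right _ (by simp)
  · exact Prod.Lex.left _ _ h

-- A's queue with its later duplicates removed: first occurrences not already in s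
def pvDedup (l : List (Int × Int)) (s : PySem.Set (Int × Int)) : List (Int × Int) :=
  match l with
  | [] => []
  | c :: t => if PySem.Set.contains s c then pvDedup t s else c :: pvDedup t (PySem.Set.add s c)

lemma pv_update_contains (s : PySem.Set (Int × Int)) (l : List (Int × Int)) (z : Int × Int) :
    PySem.Set.contains (PySem.Set.update s l) z = (PySem.Set.contains s z || decide (z ∈ l)) := by
  induction l generalizing s with
  | nil => simp [PySem.Set.update]
  | cons a t ih =>
    have hu : PySem.Set.update s (a :: t) = PySem.Set.update (PySem.Set.add s a) t := rfl
    rw [hu, ih, pv_add_contains]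
    by_cases h1 : z = a <;> by_cases h2 : z ∈ t <;> simp [h1, h2]

lemma pvDedup_mem (l : List (Int × Int)) (s : PySem.Set (Int × Int)) (z : Int × Int) :
    z ∈ pvDedup l s ↔ z ∈ l ∧ PySem.Set.contains s z = false := by
  induction l generalizing s with
  | nil => simp [pvDedup]
  | cons c t ih =>
    by_cases h : PySem.Set.contains s c = true
    · simp only [pvDedup, h, if_true]
      rw [ih, List.mem_cons]
      constructor
      · rintro ⟨h1, h2⟩
        exact ⟨Or.inr h1, h2⟩
      · rintro ⟨h1 | h1, h2⟩
        · subst h1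
          rw [h] at h2
          cases h2
        · exact ⟨h1, h2⟩
    · have h' : PySem.Set.contains s c = false := by simpa using h
      simp only [pvDedup, h', Bool.false_eq_true, if_false, List.mem_cons]
      by_cases hz : z = c
      · subst hz
        have hm : z ∉ s := by simpa [pv_contains_eq] using h'
        simp [h', hm]
      · simp [hz, ih, pv_add_contains, h']

lemma pvDedup_append (l m : List (Int × Int)) (s : PySem.Set (Int × Int)) :
    pvDedup (l ++ m) s = pvDedup l s ++ pvDedup m (PySem.Set.update s l) := by
  induction l generalizing s with
  | nil => simp [pvDedup, PySem.Set.update]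
  | cons c t ih =>
    by_cases h : PySem.Set.contains s c = true
    · have hm : c ∈ s := by simpa [pv_contains_eq] using h
      have hadd : PySem.Set.add s c = s := by simp [PySem.Set.add, h, hm]
      have hu : PySem.Set.update s (c :: t) = PySem.Set.update s t := by
        simp [PySem.Set.update, hadd]
      simp only [List.cons_append, pvDedup, h, if_true, hu]
      exact ih s
    · have h' : PySem.Set.contains s c = false := by simpa using h
      have hu : PySem.Set.update s (c :: t) = PySem.Set.update (PySem.Set.add s c) t := rfl
      simp only [List.cons_append, pvDedup, h', Bool.false_eq_true, if_false]
      rw [hu, ih]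

-- B's fused scan simulates A's stone scan (deduplicated), keeps the seen invariant,
-- and accumulates exactly A's liberty scan for the dequeued cell
lemma pvScan_sim (bA bB : List (List Int)) (x y : Int) (U : PySem.Set (Int × Int))
    (visited' : PySem.Set (Int × Int))
    (hU : ∀ z, PySem.Set.contains visited' z = true → PySem.Set.contains U z = true)
    (offs : List (Int × Int)) (accA q : List (Int × Int))
    (sn ar : PySem.Set (Int × Int))
    (hacc : pvDedup accA U = q)
    (hsn : ∀ z, PySem.Set.contains sn z = (PySem.Set.contains U z || decide (z ∈ q))) :
    (let r := offs.foldl (altVisit bA bB x y) (q, sn, ar)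
     pvDedup (pvScanAGo bA visited' x y offs accA) U = r.1 ∧
     (∀ z, PySem.Set.contains r.2.1 z = (PySem.Set.contains U z || decide (z ∈ r.1))) ∧
     r.2.2 = pvAirsGo bA bB x y offs ar) := by
  induction offs generalizing accA q sn ar with
  | nil =>
    exact ⟨by simpa [pvScanAGo] using hacc, by simpa using hsn, by simp [pvAirsGo]⟩
  | cons d t ih =>
    simp only [pvScanAGo, List.foldl_cons, altVisit, pvAirsGo, pvCellA_eq]
    have hbeq : (decide (0 ≤ x + d.1) && decide (x + d.1 < 9) && decide (0 ≤ y + d.2) &&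
        decide (y + d.2 < 9)) = pvInBoard (x + d.1) (y + d.2) := by
      simp [pvInBoard, ge_iff_le]
    rw [hbeq]
    by_cases hb : pvInBoard (x + d.1) (y + d.2) = true
    · have hno : ¬((!pvInBoard (x + d.1) (y + d.2)) = true) := by simp [hb]
      rw [if_neg hno, if_neg hno, if_pos hb]
      by_cases h2 : (pvCell bA (x + d.1) (y + d.2) != 0) = true
      · have hAne : ¬(pvCell bA (x + d.1) (y + d.2) = 0) := by simpa using h2
        have hr2 : ¬((pvCell bA (x + d.1) (y + d.2) == 0 &&
            pvCell bB (x + d.1) (y + d.2) == 0) = true) := by simp [hAne]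
        rw [if_pos h2, if_neg hr2]
        by_cases h3 : PySem.Set.contains sn (x + d.1, y + d.2) = true
        · rw [if_pos h3]
          by_cases h4 : PySem.Set.contains visited' (x + d.1, y + d.2) = true
          · have h4m : (x + d.1, y + d.2) ∈ visited' := by simpa [pv_contains_eq] using h4
            have ha2 : ¬((pvCell bA (x + d.1) (y + d.2) != 0 &&
                !PySem.Set.contains visited' (x + d.1, y + d.2)) = true) := by simp [h4m]
            rw [if_neg ha2]
            exact ih _ _ _ _ hacc hsn
          · have h4' : PySem.Set.contains visited' (x + d.1, y + d.2) = false := by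
              simpa using h4
            have h4m : (x + d.1, y + d.2) ∉ visited' := by simpa [pv_contains_eq] using h4'
            have ha2 : (pvCell bA (x + d.1) (y + d.2) != 0 &&
                !PySem.Set.contains visited' (x + d.1, y + d.2)) = true := by
              simp [hAne, h4m]
            rw [if_pos ha2]
            refine ih _ _ _ _ ?_ hsn
            rw [pvDedup_append]
            have hnb : PySem.Set.contains (PySem.Set.update U accA) (x + d.1, y + d.2) = true := by
              rw [pv_update_contains]
              have h3x := (hsn (x + d.1, y + d.2)).symm.trans h3
              rcases Bool.or_eq_true_iff.1 h3x with hU1 | hq1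
              · rw [hU1, Bool.true_or]
              · have hq2 : (x + d.1, y + d.2) ∈ q := of_decide_eq_true hq1
                rw [← hacc] at hq2
                have hmem := (pvDedup_mem accA U _).1 hq2
                rw [decide_eq_true hmem.1, Bool.or_true]
            have e : pvDedup [(x + d.1, y + d.2)] (PySem.Set.update U accA) = [] := by
              simp only [pvDedup, hnb, if_true]
            rw [e, hacc, List.append_nil]
        · have h3' : PySem.Set.contains sn (x + d.1, y + d.2) = false := by simpa using h3
          rw [if_neg h3]
          have hCU := (hsn (x + d.1, y + d.2)).symm.trans h3'
          rw [Bool.or_eq_false_iff] at hCU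
          have h4' : PySem.Set.contains visited' (x + d.1, y + d.2) = false := by
            by_contra h4x
            have h4t : PySem.Set.contains visited' (x + d.1, y + d.2) = true := by
              simpa using h4x
            rw [hU _ h4t] at hCU
            exact absurd hCU.1 (by simp)
          have h4m : (x + d.1, y + d.2) ∉ visited' := by simpa [pv_contains_eq] using h4'
          have ha2 : (pvCell bA (x + d.1) (y + d.2) != 0 &&
              !PySem.Set.contains visited' (x + d.1, y + d.2)) = true := by
            simp [hAne, h4m]
          rw [if_pos ha2]
          refine ih _ _ _ _ ?_ ?_
          · rw [pvDedup_append]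
            have hnotacc : (x + d.1, y + d.2) ∉ accA := by
              intro hmem
              have hq2 := (pvDedup_mem accA U _).2 ⟨hmem, hCU.1⟩
              rw [hacc] at hq2
              rw [decide_eq_true hq2] at hCU
              exact absurd hCU.2 (by simp)
            have hnb : PySem.Set.contains (PySem.Set.update U accA) (x + d.1, y + d.2) = false := by
              rw [pv_update_contains, hCU.1, decide_eq_false hnotacc, Bool.or_false]
            have e : pvDedup [(x + d.1, y + d.2)] (PySem.Set.update U accA) =
                [(x + d.1, y + d.2)] := by
              simp only [pvDedup, hnb, Bool.false_eq_true, if_false]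
            rw [e, hacc]
          · intro z
            rw [pv_add_contains, hsn z]
            by_cases hz1 : z = (x + d.1, y + d.2) <;> by_cases hz2 : z ∈ q <;>
              simp [hz1, hz2]
      · have hAq : pvCell bA (x + d.1) (y + d.2) = 0 := by simpa using h2
        have ha2 : ¬((pvCell bA (x + d.1) (y + d.2) != 0 &&
            !PySem.Set.contains visited' (x + d.1, y + d.2)) = true) := by simp [hAq]
        rw [if_neg ha2, if_neg h2]
        by_cases h5 : (pvCell bB (x + d.1) (y + d.2) == 0) = true
        · have hBq : pvCell bB (x + d.1) (y + d.2) = 0 := by simpa using h5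
          have hr2 : (pvCell bA (x + d.1) (y + d.2) == 0 &&
              pvCell bB (x + d.1) (y + d.2) == 0) = true := by simp [hAq, hBq]
          rw [if_pos h5, if_pos hr2]
          exact ih _ _ _ _ hacc hsn
        · have hBq : ¬(pvCell bB (x + d.1) (y + d.2) = 0) := by simpa using h5
          have hr2 : ¬((pvCell bA (x + d.1) (y + d.2) == 0 &&
              pvCell bB (x + d.1) (y + d.2) == 0) = true) := by simp [hBq]
          rw [if_neg h5, if_neg hr2]
          exact ih _ _ _ _ hacc hsn
    · have hyes : (!pvInBoard (x + d.1) (y + d.2)) = true := by simp [hb]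
      rw [if_pos hyes, if_pos hyes, if_neg hb]
      exact ih _ _ _ _ hacc hsn

-- main simulation A = C: C's loop on the deduplicated queue computes A's visited set
-- together with A's liberty sweep over the newly visited cells
lemma pvLoop_sim (bA bB : List (List Int)) (x0 y0 : Int) :
    ∀ (pA : List (Int × Int)) (v seen a : PySem.Set (Int × Int))
      (hA : ∀ p ∈ pA, p ∈ pvAllCells x0 y0)
      (hseen : ∀ z, PySem.Set.contains seen z =
        (PySem.Set.contains v z || decide (z ∈ pvDedup pA v))),
      ∃ r, pvLoopA bA x0 y0 pA v hA = v ++ r ∧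
        loopC bA bB x0 y0 (pvDedup pA v) v seen a =
          (v ++ r, r.foldl (pvAirsCell bA bB) a) := by
  intro pA v seen a hA
  revert seen a
  induction pA, v, hA using pvLoopA.induct (bA := bA) (x0 := x0) (y0 := y0) with
  | case1 v h =>
    intro seen a hseen
    refine ⟨[], ?_, ?_⟩
    · simp [pvLoopA]
    · simp [pvDedup, loopC]
  | case2 v x y rest h hv hdup ih =>
    intro seen a hseen
    have hd : pvDedup ((x, y) :: rest) v = pvDedup rest v := by
      simp only [pvDedup, hv, if_true]
    simp only [hd] at hseen
    obtain ⟨r, h1, h2⟩ := ih seen a hseen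
    refine ⟨r, ?_, ?_⟩
    · simp only [pvLoopA]
      rw [dif_pos hv]
      exact h1
    · rw [hd, h2]
  | case3 v x y rest h hv hdup ih =>
    intro seen a hseen
    have hv' : PySem.Set.contains v (x, y) = false := by simpa using hv
    have hd : pvDedup ((x, y) :: rest) v = (x, y) :: pvDedup rest (PySem.Set.add v (x, y)) := by
      simp only [pvDedup, hv', Bool.false_eq_true, if_false]
    have hvapp : PySem.Set.add v (x, y) = v ++ [(x, y)] := by
      simp only [PySem.Set.add, hv', Bool.false_eq_true, if_false]
    have hU : ∀ z, PySem.Set.contains (PySem.Set.add v (x, y)) z = true →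
        PySem.Set.contains (PySem.Set.update (PySem.Set.add v (x, y)) rest) z = true := by
      intro z hz
      rw [pv_update_contains, hz, Bool.true_or]
    have hsn0 : ∀ z, PySem.Set.contains seen z =
        (PySem.Set.contains (PySem.Set.update (PySem.Set.add v (x, y)) rest) z ||
          decide (z ∈ ([] : List (Int × Int)))) := by
      intro z
      rw [hseen z, pv_update_contains, pv_add_contains, pv_contains_eq]
      simp only [hd, List.mem_cons, List.mem_nil_iff, decide_false, Bool.or_false]
      by_cases h1 : z = (x, y) <;> by_cases h2 : z ∈ rest <;> by_cases h3 : z ∈ v <;>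
        simp [pvDedup_mem, pv_add_contains, pv_contains_eq, h1, h2, h3]
    have scan := pvScan_sim bA bB x y (PySem.Set.update (PySem.Set.add v (x, y)) rest)
      (PySem.Set.add v (x, y)) hU pvCxy [] [] seen a rfl hsn0
    obtain ⟨hs1, hs2, hs3⟩ := scan
    have hstep : altStep bA bB ([], seen, a) (x, y) =
        pvCxy.foldl (altVisit bA bB x y) ([], seen, a) := rfl
    have happ : pvDedup (rest ++ pvScanA bA (PySem.Set.add v (x, y)) x y)
        (PySem.Set.add v (x, y)) =
        pvDedup rest (PySem.Set.add v (x, y)) ++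
          (pvCxy.foldl (altVisit bA bB x y) ([], seen, a)).1 := by
      rw [pvDedup_append,
        show pvScanA bA (PySem.Set.add v (x, y)) x y =
          pvScanAGo bA (PySem.Set.add v (x, y)) x y pvCxy [] from rfl, hs1]
    have hseen' : ∀ z, PySem.Set.contains (pvCxy.foldl (altVisit bA bB x y) ([], seen, a)).2.1 z =
        (PySem.Set.contains (PySem.Set.add v (x, y)) z ||
          decide (z ∈ pvDedup (rest ++ pvScanA bA (PySem.Set.add v (x, y)) x y)
            (PySem.Set.add v (x, y)))) := by
      intro z
      rw [hs2 z, pv_update_contains, happ]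
      by_cases h2 : z ∈ rest <;>
        by_cases h3 : PySem.Set.contains (PySem.Set.add v (x, y)) z = true <;>
        by_cases h4 : z ∈ (pvCxy.foldl (altVisit bA bB x y) ([], seen, a)).1 <;>
        simp [pvDedup_mem, h2, h3, h4] <;> tauto
    obtain ⟨r', k1, k2⟩ := ih (pvCxy.foldl (altVisit bA bB x y) ([], seen, a)).2.1
      (pvCxy.foldl (altVisit bA bB x y) ([], seen, a)).2.2 hseen'
    refine ⟨(x, y) :: r', ?_, ?_⟩
    · simp only [pvLoopA]
      rw [dif_neg hv]
      rw [k1, hvapp, List.append_assoc]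
      rfl
    · rw [hd]
      simp only [loopC, hstep]
      rw [← happ, k2, hvapp, List.append_assoc, List.foldl_cons]
      have hair : (pvCxy.foldl (altVisit bA bB x y) ([], seen, a)).2.2 =
          pvAirsCell bA bB a (x, y) := hs3
      rw [hair]
      rfl

-- ===== now C = B: the level-synchronous loop equals the single-queue loop =====
-- a scan step only appends to the nxt component; the prefix already there is inert
lemma altVisit_shift (bA bB : List (List Int)) (x y : Int)
    (l : List (Int × Int)) (s a : PySem.Set (Int × Int)) (d : Int × Int) :
    altVisit bA bB x y (l, s, a) d =
      (l ++ (altVisit bA bB x y ([], s, a) d).1,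
       (altVisit bA bB x y ([], s, a) d).2.1, (altVisit bA bB x y ([], s, a) d).2.2) := by
  simp only [altVisit]
  split_ifs <;> simp

lemma pvFoldl_shift {α : Type} (f : pvSt → α → pvSt)
    (hf : ∀ l s a d, f (l, s, a) d =
      (l ++ (f ([], s, a) d).1, (f ([], s, a) d).2.1, (f ([], s, a) d).2.2)) :
    ∀ (L : List α) (l : List (Int × Int)) (s a : PySem.Set (Int × Int)),
      L.foldl f (l, s, a) =
        (l ++ (L.foldl f ([], s, a)).1, (L.foldl f ([], s, a)).2.1, (L.foldl f ([], s, a)).2.2) := by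
  intro L
  induction L with
  | nil => intro l s a; simp
  | cons d t ih =>
    intro l s a
    rw [List.foldl_cons, List.foldl_cons, hf]
    rw [ih (l ++ (f ([], s, a) d).1) ((f ([], s, a) d).2.1) ((f ([], s, a) d).2.2)]
    rw [show f ([], s, a) d =
        ((f ([], s, a) d).1, (f ([], s, a) d).2.1, (f ([], s, a) d).2.2) from rfl,
      ih ((f ([], s, a) d).1) ((f ([], s, a) d).2.1) ((f ([], s, a) d).2.2)]
    simp [List.append_assoc]

lemma altStep_shift (bA bB : List (List Int)) (l : List (Int × Int))
    (s a : PySem.Set (Int × Int)) (c : Int × Int) :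
    altStep bA bB (l, s, a) c =
      (l ++ (altStep bA bB ([], s, a) c).1,
       (altStep bA bB ([], s, a) c).2.1, (altStep bA bB ([], s, a) c).2.2) :=
  pvFoldl_shift (altVisit bA bB c.1 c.2) (altVisit_shift bA bB c.1 c.2) pvCxy l s a

-- consuming a frontier F cell by cell in C = folding B's step over F
lemma loopC_chain (bA bB : List (List Int)) (x0 y0 : Int) :
    ∀ (F nxt : List (Int × Int)) (v s a : PySem.Set (Int × Int)),
      loopC bA bB x0 y0 (F ++ nxt) v s a =
        loopC bA bB x0 y0 (F.foldl (altStep bA bB) (nxt, s, a)).1 (F.foldl PySem.Set.add v)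
          (F.foldl (altStep bA bB) (nxt, s, a)).2.1 (F.foldl (altStep bA bB) (nxt, s, a)).2.2 := by
  intro F
  induction F with
  | nil => intro nxt v s a; simp
  | cons c F' ih =>
    intro nxt v s a
    obtain ⟨x, y⟩ := c
    rw [List.cons_append]
    simp only [loopC]
    rw [List.append_assoc]
    rw [ih (nxt ++ (altStep bA bB ([], s, a) (x, y)).1) (PySem.Set.add v (x, y))
      ((altStep bA bB ([], s, a) (x, y)).2.1) ((altStep bA bB ([], s, a) (x, y)).2.2)]
    rw [List.foldl_cons, List.foldl_cons, altStep_shift bA bB nxt s a (x, y)]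

-- the scan fold keeps seen = seen₀ ∪ nxt, nxt duplicate-free and disjoint from seen₀
def pvSInv (seen : PySem.Set (Int × Int)) (st : pvSt) : Prop :=
  (∀ z, PySem.Set.contains st.2.1 z =
    (PySem.Set.contains seen z || decide (z ∈ st.1))) ∧
  st.1.Nodup ∧ (∀ z ∈ st.1, PySem.Set.contains seen z = false)

lemma altVisit_sinv {seen : PySem.Set (Int × Int)} {st : pvSt}
    (bA bB : List (List Int)) (x y : Int) (d : Int × Int)
    (h : pvSInv seen st) : pvSInv seen (altVisit bA bB x y st d) := by
  obtain ⟨h1, h2, h3⟩ := h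
  unfold altVisit
  split_ifs with g1 g2 g3 g4
  · exact ⟨h1, h2, h3⟩
  · have hns : PySem.Set.contains st.2.1 (x + d.1, y + d.2) = false := by simpa using g3
    have hns' := (h1 (x + d.1, y + d.2)).symm.trans hns
    rw [Bool.or_eq_false_iff] at hns'
    have hnm : (x + d.1, y + d.2) ∉ st.1 := by
      intro hm
      rw [decide_eq_true hm] at hns'
      exact absurd hns'.2 (by simp)
    refine ⟨?_, ?_, ?_⟩
    · intro z
      show PySem.Set.contains (PySem.Set.add st.2.1 (x + d.1, y + d.2)) z = _
      rw [pv_add_contains, h1 z]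
      by_cases e1 : z = (x + d.1, y + d.2) <;> by_cases e2 : z ∈ st.1 <;>
        simp [e1, e2]
    · exact h2.append (List.nodup_singleton _) ((List.disjoint_singleton).2 hnm)
    · intro z hz
      rcases List.mem_append.1 hz with hz1 | hz1
      · exact h3 z hz1
      · simp only [List.mem_singleton] at hz1
        subst hz1
        exact hns'.1
  · exact ⟨h1, h2, h3⟩
  · exact ⟨h1, h2, h3⟩
  · exact ⟨h1, h2, h3⟩

lemma pvFoldl_sinv {α : Type} (seen : PySem.Set (Int × Int)) (f : pvSt → α → pvSt)
    (hf : ∀ st d, pvSInv seen st → pvSInv seen (f st d)) :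
    ∀ (L : List α) (st : pvSt), pvSInv seen st → pvSInv seen (L.foldl f st) := by
  intro L
  induction L with
  | nil => intro st h; exact h
  | cons d t ih => intro st h; exact ih (f st d) (hf st d h)

lemma altRun_sinv (bA bB : List (List Int)) (F : List (Int × Int))
    (seen airs : PySem.Set (Int × Int)) :
    pvSInv seen (F.foldl (altStep bA bB) ([], seen, airs)) := by
  refine pvFoldl_sinv seen (altStep bA bB) ?_ F ([], seen, airs) ?_
  · intro st c h
    exact pvFoldl_sinv seen _ (fun st' d => altVisit_sinv bA bB c.1 c.2 d) pvCxy st h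
  · exact ⟨fun z => by simp, List.nodup_nil, by simp⟩

-- folding Set.add with fresh, duplicate-free elements is list append
lemma pvFoldl_add_eq_append :
    ∀ (F : List (Int × Int)) (v : PySem.Set (Int × Int)),
      (∀ c ∈ F, c ∉ v) → F.Nodup → F.foldl PySem.Set.add v = v ++ F := by
  intro F
  induction F with
  | nil => intro v _ _; simp
  | cons c F' ih =>
    intro v hdisj hnd
    have hcv : PySem.Set.contains v c = false := by
      rw [pv_contains_eq, decide_eq_false (hdisj c List.mem_cons_self)]
    have hadd : PySem.Set.add v c = v ++ [c] := by
      simp only [PySem.Set.add, hcv, Bool.false_eq_true, if_false]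
    rw [List.foldl_cons, hadd, ih (v ++ [c]) ?_ (List.Nodup.of_cons hnd)]
    · simp
    · intro c' hc'
      rw [List.mem_append, List.mem_singleton]
      rintro (h1 | h1)
      · exact hdisj c' (List.mem_cons_of_mem _ hc') h1
      · subst h1
        exact (List.nodup_cons.1 hnd).1 hc'

lemma pvOfList_nodup (F : List (Int × Int)) (h : F.Nodup) : PySem.Set.ofList F = F := by
  rw [PySem.Set.ofList_eq_foldl]
  simpa using pvFoldl_add_eq_append F [] (by simp) h

-- the main bridge: B's level loop = C's single-queue loop
lemma altLoop_eq_loopC (bA bB : List (List Int)) (x0 y0 : Int) :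
    ∀ (n : Nat) (F v : List (Int × Int)) (seen airs : PySem.Set (Int × Int)),
      pvUnseen x0 y0 seen = n →
      v.Nodup → F.Nodup → (∀ c ∈ F, c ∉ v) →
      (∀ z ∈ v, PySem.Set.contains seen z = true) →
      (∀ z ∈ F, PySem.Set.contains seen z = true) →
      altLoop bA bB x0 y0 F (v ++ F) seen airs = loopC bA bB x0 y0 F v seen airs := by
  intro n
  induction n using Nat.strong_induction_on with
  | _ n IH =>
    intro F v seen airs hn hvnd hFnd hdisj hvseen hFseen
    match F with
    | [] =>
      rw [List.append_nil]
      simp only [altLoop, loopC]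
      rw [pvOfList_nodup v hvnd]
    | c :: fr =>
      have hchain := loopC_chain bA bB x0 y0 (c :: fr) [] v seen airs
      rw [List.append_nil] at hchain
      have hFdisj : ∀ p ∈ (c :: fr), PySem.Set.contains v p = false := by
        intro p hp
        rw [pv_contains_eq, decide_eq_false (hdisj p hp)]
      have hfoldv : (c :: fr).foldl PySem.Set.add v = v ++ (c :: fr) :=
        pvFoldl_add_eq_append (c :: fr) v hdisj hFnd
      obtain ⟨i1, i2, i3⟩ := altRun_sinv bA bB (c :: fr) seen airs
      rw [hfoldv] at hchain
      simp only [altLoop]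
      rcases pvProg_foldl x0 y0 (altStep bA bB) (altStep_prog bA bB x0 y0) (c :: fr)
          ([], seen, airs) with ⟨e1, e2⟩ | ⟨-, -, hlt⟩
      · -- the scan discovered nothing: both loops stop with group = v ++ F
        rw [hchain, e1, e2]
        simp only [altLoop, loopC]
        rw [List.append_nil,
          pvOfList_nodup (v ++ c :: fr) ?_]
        · exact hvnd.append hFnd (List.disjoint_left.2 fun {z} hz hz' => hdisj z hz' hz)
      · -- the scan discovered new stones: recurse on the next level
        rw [hchain]
        have hnext := IH (pvUnseen x0 y0 ((c :: fr).foldl (altStep bA bB) ([], seen, airs)).2.1)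
          (by rw [← hn]; exact hlt)
          ((c :: fr).foldl (altStep bA bB) ([], seen, airs)).1 (v ++ c :: fr)
          ((c :: fr).foldl (altStep bA bB) ([], seen, airs)).2.1
          ((c :: fr).foldl (altStep bA bB) ([], seen, airs)).2.2 rfl
          ?_ i2 ?_ ?_ ?_
        · rw [← hnext]
        · exact hvnd.append hFnd (List.disjoint_left.2 fun {z} hz hz' => hdisj z hz' hz)
        · intro z hz hz'
          have hf := i3 z hz
          rcases List.mem_append.1 hz' with h1 | h1
          · rw [hvseen z h1] at hf
            cases hf
          · rw [hFseen z h1] at hf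
            cases hf
        · intro z hz
          rw [i1 z]
          rcases List.mem_append.1 hz with h1 | h1
          · rw [hvseen z h1, Bool.true_or]
          · rw [hFseen z h1, Bool.true_or]
        · intro z hz
          rw [i1 z, decide_eq_true hz, Bool.or_true]

-- ===== VERDICT (by name: the statement is the Claim_ definition above) =====
theorem bfs_group_py_spec : Claim_equal_bfs_group_py := by
  intro bA bB x0 y0 _ _
  unfold Spec_bfs_group_py bfs_group_py bfs_group_py_alt
  have hA : ∀ p ∈ [(x0, y0)], p ∈ pvAllCells x0 y0 := by
    intro p hp; simp only [List.mem_singleton] at hp; subst hp; exact List.mem_cons_self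
  have hcard : (pvAllCells x0 y0).length = 82 := by
    simp [pvAllCells]
    decide
  have hule : ∀ s : PySem.Set (Int × Int), pvUnseen x0 y0 s ≤ 82 := by
    intro s
    rw [← hcard]
    exact List.length_filter_le _ _
  have hbrA : pvLoopAF bA 400 [(x0, y0)] PySem.Set.empty =
      pvLoopA bA x0 y0 [(x0, y0)] PySem.Set.empty hA := by
    refine pvLoopAF_eq bA x0 y0 400 _ _ hA ?_
    have := hule PySem.Set.empty
    simp only [List.length_cons, List.length_nil]
    omega
  have hbrB : altLoopF bA bB 100 [(x0, y0)] [(x0, y0)]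
      (PySem.Set.add PySem.Set.empty (x0, y0)) PySem.Set.empty =
      altLoop bA bB x0 y0 [(x0, y0)] [(x0, y0)]
        (PySem.Set.add PySem.Set.empty (x0, y0)) PySem.Set.empty := by
    refine altLoopF_eq bA bB x0 y0 100 _ _ _ _ ?_
    have := hule (PySem.Set.add PySem.Set.empty (x0, y0))
    omega
  have h := pvLoop_sim bA bB x0 y0 [(x0, y0)] PySem.Set.empty
    (PySem.Set.add PySem.Set.empty (x0, y0)) PySem.Set.empty hA
    (by
      intro z
      simp [pvDedup, PySem.Set.empty, PySem.Set.add, PySem.Set.contains, List.contains_eq_mem])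
  rcases h with ⟨r, h1, h2⟩
  have e1 : pvDedup [(x0, y0)] PySem.Set.empty = [(x0, y0)] := by
    simp [pvDedup, PySem.Set.empty, PySem.Set.contains]
  have e2 : PySem.Set.add PySem.Set.empty (x0, y0) = [(x0, y0)] := by
    simp [PySem.Set.add, PySem.Set.empty, PySem.Set.contains]
  have e3 : altLoop bA bB x0 y0 [(x0, y0)] [(x0, y0)]
      (PySem.Set.add PySem.Set.empty (x0, y0)) PySem.Set.empty =
      loopC bA bB x0 y0 [(x0, y0)] PySem.Set.empty (PySem.Set.add PySem.Set.empty (x0, y0))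
        PySem.Set.empty := by
    refine altLoop_eq_loopC bA bB x0 y0 _ [(x0, y0)] PySem.Set.empty _ _ rfl ?_ ?_ ?_ ?_ ?_
    · exact List.nodup_nil
    · simp
    · simp
    · simp
    · intro z hz
      simp only [List.mem_singleton] at hz
      subst hz
      rw [e2, pv_contains_eq]
      simp
  rw [e1] at h2
  rw [hbrA, h1, hbrB, e3, h2]
  simp [PySem.Set.empty]
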